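-- pv_equiv track=rewrite | github.com/ebalzuweit/news_summary | summarize.py | _combine_quotation_clauses
-- ===== SOURCE A (Python) =====
-- def _combine_quotation_clauses(clauses):
--     combined_clauses = []
--     current_sentence = ""
--     quote_counter = 0
--     for sentence in clauses:
--         current_sentence += ' {}'.format(sentence)
--         quote_counter += sentence.count('"')
--         if quote_counter % 2 == 0:  # all quotes closed
--             combined_clauses.append(current_sentence)
--             current_sentence = ""
--             quote_counter = 0
--     if len(current_sentence) > 0:
--         combined_clauses.append(current_sentence)
--
--     return combined_clauses
-- ===== SOURCE B (Python) =====
-- def _combine_quotation_clauses(clauses):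
--     def group_end(i):
--         total = 0
--         for j in range(i, len(clauses)):
--             total += clauses[j].count('"')
--             if total % 2 == 0:
--                 return j + 1
--         return len(clauses)
--
--     out = []
--     i = 0
--     while i < len(clauses):
--         j = group_end(i)
--         out.append(''.join(' ' + s for s in clauses[i:j]))
--         i = j
--     return out
-- ===== Notes on version B (the rewrite author's own statement) =====
-- stated objective: alternative
-- what changed: B replaces A's single pass with a running concatenated string and a resetting quote counter by a two-phase decomposition: an index scan (group_end) finds the end of each quote-balanced group, then that group is sliced out of the list and joined into its output string.
import Mathlib
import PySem

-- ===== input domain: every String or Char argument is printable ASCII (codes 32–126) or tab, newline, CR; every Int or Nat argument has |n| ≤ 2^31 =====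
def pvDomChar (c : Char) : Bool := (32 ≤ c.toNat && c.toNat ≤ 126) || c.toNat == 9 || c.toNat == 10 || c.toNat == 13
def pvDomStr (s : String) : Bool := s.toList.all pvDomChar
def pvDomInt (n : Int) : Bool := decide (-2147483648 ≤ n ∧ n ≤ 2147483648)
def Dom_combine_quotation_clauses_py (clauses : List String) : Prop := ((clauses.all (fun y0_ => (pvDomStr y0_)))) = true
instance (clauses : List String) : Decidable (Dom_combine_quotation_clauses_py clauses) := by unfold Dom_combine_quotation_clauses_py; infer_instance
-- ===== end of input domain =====

-- B replaces A's single pass with a running concatenated string and resetting quote counter by a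
-- two-phase decomposition: an index scan finds each balanced-group end, then the group is sliced
-- out and joined; equal return value, no speed claim. Strings are handled as their character
-- lists (PySem.Str primitives); A is total, so no Pre_.

-- ===== PORT A =====
-- the loop of A: state = (combined_clauses, current_sentence (as chars), quote_counter)
def pvALoop : List String → List String → List Char → Nat → List String
  | [], acc, cur, _q => if 0 < cur.length then acc ++ [String.ofList cur] else acc
  | s :: rest, acc, cur, q =>
    let cur' := cur ++ (' ' :: s.toList)          -- current_sentence += ' {}'.format(sentence)
    let q' := q + PySem.Str.count s "\""          -- quote_counter += sentence.count('"')
    if q' % 2 = 0 then pvALoop rest (acc ++ [String.ofList cur']) [] 0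
    else pvALoop rest acc cur' q'

def combine_quotation_clauses_py (clauses : List String) : List String :=
  pvALoop clauses [] [] 0

-- ===== PORT B =====
-- group_end's 'for j in range(i, len(clauses))' loop, carrying total
def pvGroupEndGo (cl : List String) (total : Nat) (j : Nat) : Nat :=
  if h : j < cl.length then
    let t' := total + PySem.Str.count (cl.getD j "") "\""
    if t' % 2 = 0 then j + 1 else pvGroupEndGo cl t' (j + 1)
  else cl.length
  termination_by cl.length - j
  decreasing_by
    exact Nat.sub_succ_lt_self cl.length j h

def pvGroupEnd (cl : List String) (i : Nat) : Nat := pvGroupEndGo cl 0 i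

-- ''.join(' ' + s for s in group)
def pvSegChars (g : List String) : List Char :=
  g.foldr (fun s acc => ' ' :: s.toList ++ acc) []

theorem pvBLoop_dec (cl : List String) (i : Nat) (h1 : i < cl.length) (h2 : i < pvGroupEnd cl i) :
    cl.length - pvGroupEnd cl i < cl.length - i :=
  Nat.sub_lt_sub_left h1 h2

theorem pvGroupEndGo_gt (cl : List String) : ∀ (total j : Nat), j < cl.length →
    j < pvGroupEndGo cl total j := by
  intro total j h
  induction hn : cl.length - j generalizing total j with
  | zero => omega
  | succ n ih =>
    rw [pvGroupEndGo]
    simp only [h, dif_pos]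
    split
    · omega
    · by_cases h2 : j + 1 < cl.length
      · exact Nat.lt_of_succ_lt (ih _ (j + 1) h2 (by omega))
      · rw [pvGroupEndGo]; simp only [h2, dif_neg, not_false_iff]; omega

-- the 'while i < len(clauses)' loop of B
def pvBLoop (cl : List String) (i : Nat) : List String :=
  if hlt : i < cl.length then
    let j := pvGroupEnd cl i
    String.ofList (pvSegChars (PySem.List.slice cl (some (i : Int)) (some (j : Int)))) :: pvBLoop cl j
  else []
  termination_by cl.length - i
  decreasing_by
    exact pvBLoop_dec cl i hlt (pvGroupEndGo_gt cl 0 i hlt)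

def combine_quotation_clauses_py_alt (clauses : List String) : List String :=
  pvBLoop clauses 0

-- ===== PRECONDITION & SPEC =====
def Spec_combine_quotation_clauses_py (clauses : List String) (out : List String) : Prop := out = combine_quotation_clauses_py_alt clauses
instance (clauses : List String) (out : List String) : Decidable (Spec_combine_quotation_clauses_py clauses out) := by unfold Spec_combine_quotation_clauses_py; infer_instance

-- ===== CLAIM (what is proved, stated in full; the proofs are below) =====
def Claim_equal_combine_quotation_clauses_py : Prop := ∀ (clauses : List String), Dom_combine_quotation_clauses_py clauses → Spec_combine_quotation_clauses_py clauses (combine_quotation_clauses_py clauses)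

-- ===== LEMMAS AND PROOFS =====

-- proof-side suffix view of B: extract the shortest group with even quote count, then recurse
def pvTakeGroup : Nat → List String → List String × List String
  | _, [] => ([], [])
  | t, s :: rest =>
    let t' := t + PySem.Str.count s "\""
    if t' % 2 = 0 then ([s], rest)
    else
      let p := pvTakeGroup t' rest
      (s :: p.1, p.2)

theorem pvTakeGroup_snd_le : ∀ (t : Nat) (l : List String), (pvTakeGroup t l).2.length ≤ l.length
  | _, [] => by simp [pvTakeGroup]
  | t, s :: rest => by
    simp only [pvTakeGroup]
    split
    · simp
    · have := pvTakeGroup_snd_le (t + PySem.Str.count s "\"") rest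
      simpa using Nat.le_succ_of_le this

theorem pvTakeGroup_snd_lt (t : Nat) (s : String) (rest : List String) :
    (pvTakeGroup t (s :: rest)).2.length < (s :: rest).length := by
  simp only [pvTakeGroup]
  split
  · simp
  · have := pvTakeGroup_snd_le (t + PySem.Str.count s "\"") rest
    simpa using Nat.lt_succ_of_le this

def pvAltLoop : List String → List String
  | [] => []
  | s :: rest =>
    let p := pvTakeGroup 0 (s :: rest)
    String.ofList (pvSegChars p.1) :: pvAltLoop p.2
  termination_by l => l.length
  decreasing_by
    exact pvTakeGroup_snd_lt 0 s rest

theorem pvTakeGroup_append : ∀ (t : Nat) (l : List String),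
    (pvTakeGroup t l).1 ++ (pvTakeGroup t l).2 = l
  | _, [] => by simp [pvTakeGroup]
  | t, s :: rest => by
    simp only [pvTakeGroup]
    split
    · simp
    · simpa using pvTakeGroup_append (t + PySem.Str.count s "\"") rest

-- A's accumulator only grows by appends at the end
theorem pvALoop_acc : ∀ (l : List String) (acc : List String) (cur : List Char) (q : Nat),
    pvALoop l acc cur q = acc ++ pvALoop l [] cur q
  | [], acc, cur, q => by
    simp only [pvALoop]
    split <;> simp
  | s :: rest, acc, cur, q => by
    simp only [pvALoop]
    split
    · rw [pvALoop_acc rest (acc ++ _), pvALoop_acc rest ([] ++ _)]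
      simp
    · exact pvALoop_acc rest acc _ _

-- the heart: A's loop from a mid-group state emits cur ++ (current group) and continues as the suffix view
theorem pvMain : ∀ (l : List String) (cur : List Char) (q : Nat), l ≠ [] →
    pvALoop l [] cur q =
      String.ofList (cur ++ pvSegChars (pvTakeGroup q l).1) :: pvAltLoop (pvTakeGroup q l).2
  | [], _, _, h => absurd rfl h
  | s :: rest, cur, q, _ => by
    simp only [pvALoop, pvTakeGroup]
    split
    · -- group closes at s
      rw [pvALoop_acc]
      simp only [List.nil_append, List.cons_append]
      have htail : pvALoop rest [] [] 0 = pvAltLoop rest := by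
        cases rest with
        | nil => simp [pvALoop, pvAltLoop]
        | cons s2 r2 =>
          rw [pvMain (s2 :: r2) [] 0 (by simp)]
          conv_rhs => rw [pvAltLoop]
          simp
      rw [htail]
      simp [pvSegChars]
    · -- group continues
      cases rest with
      | nil =>
        simp only [pvTakeGroup, pvALoop]
        simp [pvSegChars, pvAltLoop]
      | cons s2 r2 =>
        rw [pvMain (s2 :: r2) (cur ++ (' ' :: s.toList)) (q + PySem.Str.count s "\"") (by simp)]
        simp [pvSegChars]
  termination_by l => l.length

-- group_end computes i + (length of the suffix view's group)
theorem pvGroupEndGo_eq (cl : List String) : ∀ (t j : Nat), j ≤ cl.length →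
    pvGroupEndGo cl t j = j + (pvTakeGroup t (cl.drop j)).1.length := by
  intro t j h
  induction hn : cl.length - j generalizing t j with
  | zero =>
    have hj : j = cl.length := by omega
    rw [pvGroupEndGo]
    simp [hj, pvTakeGroup]
  | succ n ih =>
    have hj : j < cl.length := by omega
    have hdrop : cl.drop j = cl[j] :: cl.drop (j + 1) := List.drop_eq_getElem_cons hj
    rw [pvGroupEndGo]
    simp only [hj, dif_pos, hdrop, pvTakeGroup, List.getD_eq_getElem cl "" hj]
    split
    · simp
    · rw [ih _ (j + 1) (by omega) (by omega)]
      simp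
      omega

-- B's outer loop equals the suffix view on the remaining clauses
theorem pvBLoop_eq : ∀ (cl : List String) (i : Nat), i ≤ cl.length →
    pvBLoop cl i = pvAltLoop (cl.drop i) := fun cl i h => by
  by_cases hi : i < cl.length
  · have hge := pvGroupEndGo_eq cl 0 i (by omega)
    set p := pvTakeGroup 0 (cl.drop i) with hp
    have happ : p.1 ++ p.2 = cl.drop i := pvTakeGroup_append 0 (cl.drop i)
    have hlen : p.1.length + p.2.length = cl.length - i := by
      have := congrArg List.length happ
      simpa [List.length_drop] using this
    have hj : pvGroupEnd cl i = i + p.1.length := hge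
    have hjle : pvGroupEnd cl i ≤ cl.length := by omega
    have hgt : i < pvGroupEnd cl i := pvGroupEndGo_gt cl 0 i hi
    rw [pvBLoop]
    simp only [hi, dif_pos]
    have hslice : PySem.List.slice cl (some (i : Int)) (some ((pvGroupEnd cl i : Nat) : Int))
        = p.1 := by
      rw [PySem.List.slice_natCast, hj]
      have h2 : i + p.1.length - i = p.1.length := by omega
      rw [h2, ← happ]
      exact List.take_left
    have hdropj : cl.drop (pvGroupEnd cl i) = p.2 := by
      rw [hj, ← List.drop_drop, ← happ]
      exact List.drop_left
    rw [hslice]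
    rw [pvBLoop_eq cl (pvGroupEnd cl i) hjle, hdropj]
    have hne : cl.drop i ≠ [] := by
      intro hnil
      have := congrArg List.length hnil
      simp [List.length_drop] at this
      omega
    obtain ⟨s, rest, hcons⟩ := List.exists_cons_of_ne_nil hne
    conv_rhs => rw [hcons, pvAltLoop]
    rw [← hcons, ← hp]
  · have : i = cl.length := by omega
    rw [pvBLoop]
    simp [this, pvAltLoop]
  termination_by cl i _ => cl.length - i
  decreasing_by
    exact pvBLoop_dec cl i hi hgt

-- ===== VERDICT (by name: the statement is the Claim_ definition above) =====
theorem combine_quotation_clauses_py_spec : Claim_equal_combine_quotation_clauses_py := by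
  intro clauses _
  unfold Spec_combine_quotation_clauses_py combine_quotation_clauses_py combine_quotation_clauses_py_alt
  rw [pvBLoop_eq clauses 0 (by omega)]
  cases clauses with
  | nil => simp [pvALoop, pvAltLoop]
  | cons s rest =>
    rw [pvMain (s :: rest) [] 0 (by simp)]
    conv_rhs => rw [List.drop_zero, pvAltLoop]
    simp
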